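-- pv_equiv track=rewrite | github.com/MrBrantCode/unitest_baseline | mut_generate/mist_train_taco/taco_3192/solution.py | lexicographically_smallest_string
-- ===== SOURCE A (Python) =====
-- def lexicographically_smallest_string(s: str) -> str:
--     arr = list(s)
--     freq = [0] * 26
--
--     # Calculate frequency of each character
--     for c in arr:
--         freq[ord(c) - ord('a')] += 1
--
--     # Try to find the lexicographically smallest string
--     for i in range(len(arr)):
--         curr = arr[i]
--         for j in range(ord(curr) - ord('a')):
--             if freq[j] > 0:
--                 return replace(arr, curr, chr(ord('a') + j))
--         freq[ord(curr) - ord('a')] = 0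
--
--     return s
--
-- def replace(arr: list, a: str, b: str) -> str:
--     for i in range(len(arr)):
--         if arr[i] == a:
--             arr[i] = b
--         elif arr[i] == b:
--             arr[i] = a
--     return ''.join(arr)
-- ===== SOURCE B (Python) =====
-- def lexicographically_smallest_string(s: str) -> str:
--     if not all('a' <= c <= 'z' for c in s):
--         raise ValueError("expected a string of lowercase letters")
--     # distinct characters present, in increasing order; k points at the
--     # smallest character not yet "used up" as a running minimum
--     order = sorted(set(s))
--     k = 0
--     for c in s:
--         if k < len(order) and c == order[k]:
--             k += 1
--         elif k < len(order) and c > order[k]: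
--             m = order[k]
--             return ''.join(m if x == c else c if x == m else x for x in s)
--     return s
-- ===== Notes on version B (the rewrite author's own statement) =====
-- stated objective: faster
-- what changed: Replaces the 26-slot frequency table with its per-character inner scan over all smaller letters by a sorted list of the distinct characters with a single advancing pointer (constant-factor win: no 26-wide scan per character), and the index-mutating replace helper by one join over a comprehension; B validates its lowercase domain up front, so Pre_ restricts to all-lowercase strings, outside which A raises IndexError or returns values produced by accidental negative-index wraparound into the frequency table while B raises ValueError.
-- outside the precondition, e.g. on lexicographically_smallest_string('b`'): A returns 'b`', B raises ValueError; on lexicographically_smallest_string('G'): A returns 'G', B raises ValueError; on lexicographically_smallest_string('`'): A returns '`', B raises ValueError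
import Mathlib
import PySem

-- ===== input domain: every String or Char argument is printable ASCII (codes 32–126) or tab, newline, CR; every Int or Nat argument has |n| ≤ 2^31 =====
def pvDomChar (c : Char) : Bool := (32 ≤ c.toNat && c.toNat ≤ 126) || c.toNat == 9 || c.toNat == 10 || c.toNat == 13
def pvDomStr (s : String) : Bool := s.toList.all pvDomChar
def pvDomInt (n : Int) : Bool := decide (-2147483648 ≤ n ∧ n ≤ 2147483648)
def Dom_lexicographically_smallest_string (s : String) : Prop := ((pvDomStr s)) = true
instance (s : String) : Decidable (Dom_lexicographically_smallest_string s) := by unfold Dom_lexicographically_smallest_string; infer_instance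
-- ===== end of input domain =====

-- B replaces A's 26-slot frequency table + per-character inner scan over smaller letters
-- by a sorted distinct-character list with one advancing pointer (measured faster by the
-- timing run); B raises ValueError on non-lowercase input, where A raises or wraps.

-- ===== PORT A =====
-- helper `replace(arr, a, b)`: per-element two-way swap, same branch order as the Python
def pvReplaceA (arr : List Char) (a b : Char) : String :=
  String.ofList (arr.map (fun x => if x = a then b else if x = b then a else x))

-- inner loop `for j in range(n): if freq[j] > 0: return replace(...)` — returns the first hit
def pvInnerA (freq : List Int) : Nat → Nat → Option Nat
  | _, 0 => none
  | j, fuel + 1 =>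
      if 0 < PySem.List.pyGetD freq (j : Int) 0 then some j
      else pvInnerA freq (j + 1) fuel

-- outer loop over the characters, carrying the frequency table; `none` = fell through
def pvLoopA (arr : List Char) : List Char → List Int → Option String
  | [], _ => none
  | c :: rest, freq =>
      match pvInnerA freq 0 (c.toNat - 97) with
      | some j => some (pvReplaceA arr c (Char.ofNat (97 + j)))
      | none => pvLoopA arr rest (PySem.List.pySetD freq ((c.toNat : Int) - 97) 0)

def lexicographically_smallest_string (s : String) : String :=
  let arr := s.toList
  -- counting loop: freq[ord(c) - ord('a')] += 1; `none` = IndexError (outside Pre_)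
  match arr.foldl
      (fun acc c => acc.bind fun f =>
        (PySem.List.pyGet? f ((c.toNat : Int) - 97)).bind fun v =>
          PySem.List.pySet? f ((c.toNat : Int) - 97) (v + 1))
      (some (List.replicate 26 (0 : Int))) with
  | none => s
  | some freq => (pvLoopA arr arr freq).getD s

-- ===== PORT B =====
-- single pass with pointer k into the sorted distinct characters
def pvLoopB (s : String) (order : List Char) : Nat → List Char → String
  | _, [] => s
  | k, c :: rest =>
      if k < order.length ∧ c = order.getD k c then pvLoopB s order (k + 1) rest
      else if k < order.length ∧ order.getD k c < c then
        let m := order.getD k c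
        String.ofList (s.toList.map (fun x => if x = c then m else if x = m then c else x))
      else pvLoopB s order k rest

def lexicographically_smallest_string_alt (s : String) : String :=
  -- Source B raises ValueError when the guard fails (outside Pre_); the port returns s there
  if (s.toList.all (fun c => decide ('a' ≤ c) && decide (c ≤ 'z'))) = true then
    let order := PySem.List.sorted (PySem.Set.ofList s.toList) (fun x => x) false
    pvLoopB s order 0 s.toList
  else s

-- ===== PRECONDITION & SPEC =====
-- Pre_ restricts to the task's natural domain, all-lowercase strings: outside it A either
-- raises IndexError (chars below 'G' or above 'z') or, for chars 'G'..'`', returns values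
-- produced by accidental negative-index wraparound into the 26-slot frequency table,
-- while B rejects the input with ValueError.
def Pre_lexicographically_smallest_string (s : String) : Prop :=
  (s.toList.all (fun c => decide ('a' ≤ c) && decide (c ≤ 'z'))) = true
instance (s : String) : Decidable (Pre_lexicographically_smallest_string s) := by
  unfold Pre_lexicographically_smallest_string; infer_instance

def pvWitness_lexicographically_smallest_string : String := "cba"

def Spec_lexicographically_smallest_string (s : String) (out : String) : Prop := out = lexicographically_smallest_string_alt s
instance (s : String) (out : String) : Decidable (Spec_lexicographically_smallest_string s out) := by unfold Spec_lexicographically_smallest_string; infer_instance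

-- ===== CLAIM (what is proved, stated in full; the proofs are below) =====
def Claim_equal_lexicographically_smallest_string : Prop := ∀ (s : String), Dom_lexicographically_smallest_string s → Pre_lexicographically_smallest_string s → Spec_lexicographically_smallest_string s (lexicographically_smallest_string s)

-- ===== LEMMAS AND PROOFS =====

theorem pvCharLt (a b : Char) : a < b ↔ a.toNat < b.toNat := by
  rw [Char.lt_def, UInt32.lt_iff_toNat_lt]; rfl
theorem pvCharLe (a b : Char) : a ≤ b ↔ a.toNat ≤ b.toNat := by
  rw [Char.le_def, UInt32.le_iff_toNat_le]; rfl
theorem pvCharToNatOfNat (n : Nat) (h : n < 55296) : (Char.ofNat n).toNat = n := by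
  rw [Char.toNat_ofNat]; simp [Nat.isValidChar, h]
theorem pvCharToNatInj {a b : Char} (h : a.toNat = b.toNat) : a = b := by
  have := Char.ofNat_toNat a
  rw [h, Char.ofNat_toNat] at this; exact this.symm
theorem pvGetDSet (f : List Int) (hf : f.length = 26) (i j : Nat)
    (hj : j < 26) (v : Int) :
    (f.set i v).getD j 0 = if i = j then v else f.getD j 0 := by
  rw [List.getD_eq_getElem _ _ (by simpa [hf] using hj),
      List.getD_eq_getElem _ _ (by omega)]
  simp [List.getElem_set]
theorem pvInnerA_none (freq : List Int) (fuel : Nat) : ∀ (j0 : Nat),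
    (∀ t, j0 ≤ t → t < j0 + fuel → ¬ 0 < PySem.List.pyGetD freq (t : Int) 0) →
    pvInnerA freq j0 fuel = none := by
  induction fuel with
  | zero => intro j0 h; rfl
  | succ n ih =>
      intro j0 h
      rw [pvInnerA, if_neg (h j0 le_rfl (by omega))]
      exact ih (j0 + 1) (fun t ht1 ht2 => h t (by omega) (by omega))
theorem pvInnerA_some (freq : List Int) (fuel : Nat) : ∀ (j0 j : Nat), j0 ≤ j →
    j < j0 + fuel → 0 < PySem.List.pyGetD freq (j : Int) 0 →
    (∀ t, j0 ≤ t → t < j → ¬ 0 < PySem.List.pyGetD freq (t : Int) 0) →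
    pvInnerA freq j0 fuel = some j := by
  induction fuel with
  | zero => intro j0 j h1 h2; omega
  | succ n ih =>
      intro j0 j hj0 hlt hP hmin
      by_cases he : j0 = j
      · subst he; rw [pvInnerA, if_pos hP]
      · rw [pvInnerA, if_neg (hmin j0 le_rfl (by omega))]
        exact ih (j0 + 1) j (by omega) (by omega) hP (fun t ht1 ht2 => hmin t (by omega) ht2)


theorem pvLoopA_cons_none (arr rest : List Char) (c : Char) (freq : List Int)
    (h : pvInnerA freq 0 (c.toNat - 97) = none) :
    pvLoopA arr (c :: rest) freq
      = pvLoopA arr rest (PySem.List.pySetD freq ((c.toNat : Int) - 97) 0) := by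
  show (match pvInnerA freq 0 (c.toNat - 97) with
        | some j => some (pvReplaceA arr c (Char.ofNat (97 + j)))
        | none => pvLoopA arr rest (PySem.List.pySetD freq ((c.toNat : Int) - 97) 0)) = _
  rw [h]

theorem pvLoopA_cons_some (arr rest : List Char) (c : Char) (freq : List Int) (j : Nat)
    (h : pvInnerA freq 0 (c.toNat - 97) = some j) :
    pvLoopA arr (c :: rest) freq = some (pvReplaceA arr c (Char.ofNat (97 + j))) := by
  show (match pvInnerA freq 0 (c.toNat - 97) with
        | some j => some (pvReplaceA arr c (Char.ofNat (97 + j)))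
        | none => pvLoopA arr rest (PySem.List.pySetD freq ((c.toNat : Int) - 97) 0)) = _
  rw [h]

theorem pvLoopB_cons (s : String) (order : List Char) (k : Nat) (c : Char)
    (rest : List Char) :
    pvLoopB s order k (c :: rest)
      = if k < order.length ∧ c = order.getD k c then pvLoopB s order (k + 1) rest
        else if k < order.length ∧ order.getD k c < c then
          String.ofList (s.toList.map
            (fun x => if x = c then order.getD k c
                      else if x = order.getD k c then c else x))
        else pvLoopB s order k rest := rfl

theorem pvLoopEq (s : String) (order : List Char)
    (hord : ∀ x : Char, x ∈ order ↔ x ∈ s.toList)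
    (hsorted : order.Pairwise (· < ·))
    (hlow : ∀ c ∈ s.toList, 97 ≤ c.toNat ∧ c.toNat ≤ 122) :
    ∀ (rest : List Char) (freq : List Int) (k : Nat),
    (∀ x ∈ rest, x ∈ s.toList) →
    freq.length = 26 → k ≤ order.length →
    (∀ j, j < 26 → (0 < freq.getD j 0 ↔ Char.ofNat (97 + j) ∈ order.drop k)) →
    (pvLoopA s.toList rest freq).getD s = pvLoopB s order k rest := by
  intro rest
  induction rest with
  | nil => intro freq k _ _ _ _; rfl
  | cons c rest ih =>
      intro freq k hsub hlen hk inv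
      have hcs : c ∈ s.toList := hsub c (by simp)
      obtain ⟨hc97, hc122⟩ := hlow c hcs
      have hco : c ∈ order := (hord c).mpr hcs
      have hidx : ((c.toNat : Int) - 97) = ((c.toNat - 97 : Nat) : Int) := by omega
      have hi26 : c.toNat - 97 < 26 := by omega
      have hsetC : PySem.List.pySetD freq ((c.toNat : Int) - 97) 0
          = freq.set (c.toNat - 97) 0 := by
        rw [hidx]; exact PySem.List.pySetD_natCast freq _ 0
      have hchrC : Char.ofNat (97 + (c.toNat - 97)) = c := pvCharToNatInj
        (by rw [pvCharToNatOfNat _ (by omega)]; omega)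
      have hpg : ∀ t : Nat, PySem.List.pyGetD freq (t : Int) 0 = freq.getD t 0 := by
        intro t; simp [PySem.List.pyGetD_natCast]
      by_cases hklt : k < order.length
      · have hdrop : order.drop k = order[k] :: order.drop (k + 1) :=
          List.drop_eq_getElem_cons hklt
        have hpk : (order.drop k).Pairwise (· < ·) :=
          hsorted.sublist (List.drop_sublist _ _)
        have hgeodd : ∀ x ∈ order.drop (k + 1), order[k] < x := by
          intro x hx
          exact List.rel_of_pairwise_cons (hdrop ▸ hpk) hx
        have hge : ∀ x ∈ order.drop k, order[k] ≤ x := by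
          intro x hx; rw [hdrop, List.mem_cons] at hx
          rcases hx with h | h
          · exact h ▸ le_rfl
          · exact le_of_lt (hgeodd x h)
        have hms : order[k] ∈ s.toList := (hord order[k]).mp (List.getElem_mem hklt)
        obtain ⟨hm97, hm122⟩ := hlow order[k] hms
        have hgetD : order.getD k c = order[k] := by rw [List.getD_eq_getElem _ _ hklt]
        rcases lt_trichotomy c order[k] with hcm | hcm | hcm
        · -- c < order[k] : neither program fires; pointer stays
          have hcmn : c.toNat < order[k].toNat := (pvCharLt _ _).mp hcm
          have hnone : pvInnerA freq 0 (c.toNat - 97) = none := by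
            apply pvInnerA_none
            intro t _ ht hpos
            rw [hpg t] at hpos
            have hmem := (inv t (by omega)).mp hpos
            have := (pvCharLe _ _).mp (hge _ hmem)
            rw [pvCharToNatOfNat _ (by omega)] at this
            omega
          rw [pvLoopA_cons_none _ _ _ _ hnone, hsetC]
          rw [pvLoopB_cons, if_neg (by rw [hgetD]; rintro ⟨_, h⟩; exact absurd h (ne_of_lt hcm)),
              if_neg (by rw [hgetD]; rintro ⟨_, h⟩; exact absurd hcm (not_lt_of_gt h))]
          apply ih _ _ (fun x hx => hsub x (by simp [hx])) (by simpa using hlen) hk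
          intro j hj
          rw [pvGetDSet freq hlen _ j hj]
          by_cases hji : c.toNat - 97 = j
          · rw [if_pos hji]
            have hcj : Char.ofNat (97 + j) = c := hji ▸ hchrC
            constructor
            · intro h; omega
            · intro hmem
              exact absurd (hge _ (hcj ▸ hmem)) (not_le_of_gt hcm)
          · rw [if_neg hji]; exact inv j hj
        · -- c = order[k] : A clears the minimum, B advances the pointer
          have hcmn : c.toNat = order[k].toNat := by rw [hcm]
          have hnone : pvInnerA freq 0 (c.toNat - 97) = none := by
            apply pvInnerA_none
            intro t _ ht hpos
            rw [hpg t] at hpos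
            have hmem := (inv t (by omega)).mp hpos
            have := (pvCharLe _ _).mp (hge _ hmem)
            rw [pvCharToNatOfNat _ (by omega)] at this
            omega
          rw [pvLoopA_cons_none _ _ _ _ hnone, hsetC]
          rw [pvLoopB_cons, if_pos (by rw [hgetD]; exact ⟨hklt, hcm⟩)]
          apply ih _ _ (fun x hx => hsub x (by simp [hx])) (by simpa using hlen) (by omega)
          intro j hj
          rw [pvGetDSet freq hlen _ j hj]
          have hchrj : (Char.ofNat (97 + j)).toNat = 97 + j := pvCharToNatOfNat _ (by omega)
          by_cases hji : c.toNat - 97 = j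
          · rw [if_pos hji]
            have hcj : Char.ofNat (97 + j) = c := hji ▸ hchrC
            constructor
            · intro h; omega
            · intro hmem
              exact absurd (hgeodd _ ((hcm ▸ hcj : Char.ofNat (97+j) = order[k]) ▸ hmem))
                (lt_irrefl _)
          · rw [if_neg hji]
            rw [inv j hj, hdrop, List.mem_cons]
            refine or_iff_right ?_
            intro he
            rw [he] at hchrj
            omega
        · -- order[k] < c : both programs perform the swap with order[k]
          have hcmn : order[k].toNat < c.toNat := (pvCharLt _ _).mp hcm
          have hsome : pvInnerA freq 0 (c.toNat - 97) = some (order[k].toNat - 97) := by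
            apply pvInnerA_some _ _ 0 _ (Nat.zero_le _) (by omega)
            · rw [hpg]
              refine (inv _ (by omega)).mpr ?_
              have : Char.ofNat (97 + (order[k].toNat - 97)) = order[k] := pvCharToNatInj
                (by rw [pvCharToNatOfNat _ (by omega)]; omega)
              rw [this, hdrop]; exact List.mem_cons_self
            · intro t _ ht hpos
              rw [hpg t] at hpos
              have hmem := (inv t (by omega)).mp hpos
              have := (pvCharLe _ _).mp (hge _ hmem)
              rw [pvCharToNatOfNat _ (by omega)] at this
              omega
          have hchrm : Char.ofNat (97 + (order[k].toNat - 97)) = order[k] := pvCharToNatInj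
            (by rw [pvCharToNatOfNat _ (by omega)]; omega)
          rw [pvLoopA_cons_some _ _ _ _ _ hsome, Option.getD_some]
          rw [pvLoopB_cons, if_neg (by rw [hgetD]; rintro ⟨_, h⟩; exact absurd h.symm (ne_of_lt hcm)),
              if_pos (by rw [hgetD]; exact ⟨hklt, hcm⟩)]
          rw [pvReplaceA, hchrm, hgetD]
      · -- k = order.length : the suffix is empty, every frequency is cleared
        have hkeq : order.length ≤ k := Nat.le_of_not_lt hklt
        have hdrop : order.drop k = [] := List.drop_eq_nil_of_le hkeq
        have hnone : pvInnerA freq 0 (c.toNat - 97) = none := by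
          apply pvInnerA_none
          intro t _ ht hpos
          rw [hpg t] at hpos
          have hmem := (inv t (by omega)).mp hpos
          rw [hdrop] at hmem
          exact absurd hmem (List.not_mem_nil)
        rw [pvLoopA_cons_none _ _ _ _ hnone, hsetC]
        rw [pvLoopB_cons, if_neg (by rintro ⟨h, _⟩; exact hklt h),
            if_neg (by rintro ⟨h, _⟩; exact hklt h)]
        apply ih _ _ (fun x hx => hsub x (by simp [hx])) (by simpa using hlen) hk
        intro j hj
        rw [pvGetDSet freq hlen _ j hj, hdrop]
        by_cases hji : c.toNat - 97 = j
        · rw [if_pos hji]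
          simp
        · rw [if_neg hji]
          rw [inv j hj, hdrop]

theorem pvCountFold (arr : List Char) (hlc : ∀ c ∈ arr, 97 ≤ c.toNat ∧ c.toNat ≤ 122) :
    ∀ f : List Int, f.length = 26 →
    ∃ g, List.foldl
        (fun acc c => acc.bind fun f =>
          (PySem.List.pyGet? f ((c.toNat : Int) - 97)).bind fun v =>
            PySem.List.pySet? f ((c.toNat : Int) - 97) (v + 1))
        (some f) arr = some g
      ∧ g.length = 26
      ∧ ∀ j, j < 26 → g.getD j 0 = f.getD j 0 + (arr.count (Char.ofNat (97 + j)) : Int) := by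
  induction arr with
  | nil => intro f hf; exact ⟨f, rfl, hf, by simp⟩
  | cons c arr ih =>
      intro f hf
      obtain ⟨h97, h122⟩ := hlc c (by simp)
      have hidx : ((c.toNat : Int) - 97) = ((c.toNat - 97 : Nat) : Int) := by omega
      have hi : c.toNat - 97 < 26 := by omega
      have hget : PySem.List.pyGet? f ((c.toNat : Int) - 97)
          = some (f[c.toNat - 97]'(by omega)) := by
        rw [hidx]; exact PySem.List.pyGet?_ofNat f (c.toNat - 97) (by omega)
      have hset : PySem.List.pySet? f ((c.toNat : Int) - 97) (f[c.toNat - 97]'(by omega) + 1)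
          = some (f.set (c.toNat - 97) (f[c.toNat - 97]'(by omega) + 1)) := by
        rw [hidx]; exact PySem.List.pySet?_natCast f (c.toNat - 97) _ (by omega)
      obtain ⟨g, hfold, hg, hval⟩ := ih (fun x hx => hlc x (by simp [hx]))
        (f.set (c.toNat - 97) (f[c.toNat - 97]'(by omega) + 1)) (by simpa using hf)
      refine ⟨g, ?_, hg, ?_⟩
      · rw [List.foldl_cons]
        simp only [Option.bind_some, hget, Option.bind_some, hset]
        exact hfold
      · intro j hj
        rw [hval j hj, pvGetDSet f hf _ j hj]
        have hchr : (Char.ofNat (97 + j)).toNat = 97 + j := pvCharToNatOfNat _ (by omega)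
        by_cases hcase : c.toNat - 97 = j
        · have hc : Char.ofNat (97 + j) = c := pvCharToNatInj (by omega)
          rw [if_pos hcase, List.count_cons, if_pos (by exact beq_iff_eq.mpr hc.symm)]
          have : f.getD j 0 = f[c.toNat - 97]'(by omega) := by
            rw [List.getD_eq_getElem _ _ (by omega)]; congr 1; omega
          push_cast; rw [this]; ring
        · have hc : ¬ (Char.ofNat (97 + j) = c) := by
            intro he; apply hcase; have := hchr; rw [he] at this; omega
          rw [if_neg hcase, List.count_cons, if_neg (by simpa using fun he => hc he.symm)]
          push_cast; ring


-- ===== VERDICT (by name: the statement is the Claim_ definition above) =====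
theorem lexicographically_smallest_string_spec : Claim_equal_lexicographically_smallest_string := by
  intro s _ hpre
  unfold Spec_lexicographically_smallest_string
  have hlow : ∀ c ∈ s.toList, 97 ≤ c.toNat ∧ c.toNat ≤ 122 := by
    intro c hc
    unfold Pre_lexicographically_smallest_string at hpre
    have h := List.all_eq_true.mp hpre c hc
    simp only [Bool.and_eq_true, decide_eq_true_eq] at h
    obtain ⟨h1, h2⟩ := h
    rw [Char.le_def, UInt32.le_iff_toNat_le] at h1 h2
    exact ⟨h1, h2⟩
  obtain ⟨g, hfold, hg, hval⟩ := pvCountFold s.toList hlow (List.replicate 26 0) (by simp)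
  have hA : lexicographically_smallest_string s = (pvLoopA s.toList s.toList g).getD s := by
    show (match List.foldl
        (fun acc c => acc.bind fun f =>
          (PySem.List.pyGet? f ((c.toNat : Int) - 97)).bind fun v =>
            PySem.List.pySet? f ((c.toNat : Int) - 97) (v + 1))
        (some (List.replicate 26 (0 : Int))) s.toList with
      | none => s
      | some freq => (pvLoopA s.toList s.toList freq).getD s) = _
    rw [hfold]
  have hB : lexicographically_smallest_string_alt s
      = pvLoopB s (PySem.List.sorted (PySem.Set.ofList s.toList) (fun x => x) false) 0
          s.toList := by
    unfold lexicographically_smallest_string_alt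
    have hc : (s.toList.all fun c => decide ('a' ≤ c) && decide (c ≤ 'z')) = true := hpre
    rw [if_pos hc]
  rw [hA, hB]
  apply pvLoopEq s _
    (fun x => by
      rw [PySem.List.mem_sorted, PySem.Set.mem_ofList])
    (PySem.List.sorted_ofList_pairwise_lt s.toList)
    hlow s.toList g 0 (fun x hx => hx) hg (Nat.zero_le _)
  intro j hj
  rw [hval j hj, List.drop_zero, PySem.List.mem_sorted, PySem.Set.mem_ofList]
  rw [List.getD_replicate _ hj, zero_add]
  exact_mod_cast List.count_pos_iff
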